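-- pv_equiv track=rewrite | github.com/J-bakers/thesis | pipeline10.py | split_robot_vertex_ids
-- ===== SOURCE A (Python) =====
-- def split_robot_vertex_ids(vertex_ids, threshold=1000):
--     vertex_ids = sorted(vertex_ids)
--     groups = []
--     current_group = [vertex_ids[0]]
--     for i in range(1, len(vertex_ids)):
--         if vertex_ids[i] - vertex_ids[i - 1] > threshold:
--             groups.append(current_group)
--             current_group = [vertex_ids[i]]
--         else:
--             current_group.append(vertex_ids[i])
--     groups.append(current_group)
--     return groups
-- ===== SOURCE B (Python) =====
-- def split_robot_vertex_ids(vertex_ids, threshold=1000):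
--     s = sorted(vertex_ids)
--     if not s:
--         return []
--     breaks = [i for i in range(1, len(s)) if s[i] - s[i - 1] > threshold]
--     bounds = [0] + breaks + [len(s)]
--     return [s[a:b] for a, b in zip(bounds, bounds[1:])]
-- ===== Notes on version B (the rewrite author's own statement) =====
-- stated objective: alternative
-- what changed: Replaces A's single stateful accumulator loop (groups/current_group) by a two-phase decomposition: first collect the break indices where the gap exceeds the threshold, then slice the sorted list at those breakpoints.
import Mathlib
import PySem

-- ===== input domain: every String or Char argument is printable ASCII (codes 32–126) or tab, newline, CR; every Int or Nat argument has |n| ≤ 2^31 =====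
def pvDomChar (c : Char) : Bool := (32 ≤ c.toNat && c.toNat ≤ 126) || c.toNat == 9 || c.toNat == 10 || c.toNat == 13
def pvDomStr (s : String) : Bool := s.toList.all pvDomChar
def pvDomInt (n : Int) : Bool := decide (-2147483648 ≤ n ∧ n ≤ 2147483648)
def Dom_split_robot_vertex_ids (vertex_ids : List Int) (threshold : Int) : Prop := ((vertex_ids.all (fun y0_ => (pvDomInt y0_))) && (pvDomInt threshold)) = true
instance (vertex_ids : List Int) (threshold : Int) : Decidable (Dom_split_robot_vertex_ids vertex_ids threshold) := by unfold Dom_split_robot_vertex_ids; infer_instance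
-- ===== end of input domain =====

-- B replaces A's stateful accumulator loop by "collect break indices, then slice at the
-- breakpoints"; equivalence of the RETURN values is proved on nonempty input (A raises
-- IndexError on []); A does not mutate its argument (sorted makes a copy).

-- ===== PORT A =====
def split_robot_vertex_ids (vertex_ids : List Int) (threshold : Int) : List (List Int) :=
  let s := PySem.List.sorted vertex_ids (fun x => x) false
  -- vertex_ids[0]: IndexError on [] is excluded by Pre_; pyGetD is exact on nonempty input
  let st := (PySem.List.pyRange 1 (s.length : Int) 1).foldl
    (fun (st : List (List Int) × List Int) i =>
      if PySem.List.pyGetD s i 0 - PySem.List.pyGetD s (i - 1) 0 > threshold then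
        (st.1 ++ [st.2], [PySem.List.pyGetD s i 0])
      else
        (st.1, st.2 ++ [PySem.List.pyGetD s i 0]))
    ([], [PySem.List.pyGetD s 0 0])
  st.1 ++ [st.2]

-- ===== PORT B =====
def split_robot_vertex_ids_alt (vertex_ids : List Int) (threshold : Int) : List (List Int) :=
  let s := PySem.List.sorted vertex_ids (fun x => x) false
  if s = [] then []
  else
    let breaks := (PySem.List.pyRange 1 (s.length : Int) 1).filter
      (fun i => PySem.List.pyGetD s i 0 - PySem.List.pyGetD s (i - 1) 0 > threshold)
    let bounds := 0 :: breaks ++ [(s.length : Int)]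
    (bounds.zip bounds.tail).map (fun ab => PySem.List.slice s (some ab.1) (some ab.2))

-- ===== PRECONDITION & SPEC =====
-- Pre_ excludes exactly the empty list, on which A raises IndexError (vertex_ids[0]).
def Pre_split_robot_vertex_ids (vertex_ids : List Int) (threshold : Int) : Prop :=
  vertex_ids ≠ []
instance (vertex_ids : List Int) (threshold : Int) : Decidable (Pre_split_robot_vertex_ids vertex_ids threshold) := by unfold Pre_split_robot_vertex_ids; infer_instance
def pvWitness_split_robot_vertex_ids : List Int × Int := ([3, 1200, 5], 1000)

def Spec_split_robot_vertex_ids (vertex_ids : List Int) (threshold : Int) (out : List (List Int)) : Prop := out = split_robot_vertex_ids_alt vertex_ids threshold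
instance (vertex_ids : List Int) (threshold : Int) (out : List (List Int)) : Decidable (Spec_split_robot_vertex_ids vertex_ids threshold out) := by unfold Spec_split_robot_vertex_ids; infer_instance

-- ===== CLAIM (what is proved, stated in full; the proofs are below) =====
def Claim_equal_split_robot_vertex_ids : Prop := ∀ (vertex_ids : List Int) (threshold : Int), Dom_split_robot_vertex_ids vertex_ids threshold → Pre_split_robot_vertex_ids vertex_ids threshold → Spec_split_robot_vertex_ids vertex_ids threshold (split_robot_vertex_ids vertex_ids threshold)

-- ===== LEMMAS AND PROOFS =====

-- consH prepends onto the open head group; grpT th prev t = the groups of t relative to prev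
def consH (x : Int) (G : List (List Int)) : List (List Int) := (x :: G.headD []) :: G.tail

def grpT (th : Int) (prev : Int) : List Int → List (List Int)
  | [] => [[]]
  | y :: r => if y - prev > th then [] :: consH y (grpT th y r) else consH y (grpT th y r)

-- Nat-level form of B's bounds and slices
def sliceAt (s : List Int) (ab : Nat × Nat) : List Int := (s.drop ab.1).take (ab.2 - ab.1)

def natBounds (th : Int) (s : List Int) : List Nat :=
  0 :: ((List.range (s.length - 1)).filter
        (fun k => decide (s.getD (k + 1) 0 - s.getD k 0 > th))).map (· + 1) ++ [s.length]

def natSlices (th : Int) (s : List Int) : List (List Int) :=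
  ((natBounds th s).zip (natBounds th s).tail).map (sliceAt s)

-- range(1, len(s)) as a mapped Nat range
theorem rangeCast (s : List Int) :
    PySem.List.pyRange 1 (s.length : Int) 1
      = (List.range (s.length - 1)).map (fun k => ((k + 1 : Nat) : Int)) := by
  rw [PySem.List.pyRange_one]
  have hlen : ((s.length : Int) - 1).toNat = s.length - 1 := by omega
  rw [hlen]
  apply List.map_congr_left
  intro k _
  push_cast
  ring

-- consecutive pairs read off by index are zip s s.tail
theorem zipPairs (s : List Int) :
    (List.range (s.length - 1)).map (fun k => (s.getD k 0, s.getD (k + 1) 0)) = s.zip s.tail := by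
  apply List.ext_getElem
  · simp [List.length_zip]
  · intro k h1 h2
    have hk : k < s.length - 1 := by simpa using h1
    simp only [List.getElem_map, List.getElem_range, List.getElem_zip, List.getElem_tail]
    rw [List.getD_eq_getElem _ _ (by omega), List.getD_eq_getElem _ _ (by omega)]

-- the accumulator loop over consecutive pairs computes grpT
theorem goZip (th : Int) (t : List Int) :
    ∀ (prev : Int) (g : List (List Int)) (c : List Int),
    (let st := ((prev :: t).zip t).foldl
        (fun (st : List (List Int) × List Int) (p : Int × Int) =>
          if p.2 - p.1 > th then (st.1 ++ [st.2], [p.2]) else (st.1, st.2 ++ [p.2]))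
        (g, c)
     st.1 ++ [st.2]) = g ++ ((c ++ (grpT th prev t).headD []) :: (grpT th prev t).tail) := by
  induction t with
  | nil => intro prev g c; simp [grpT]
  | cons y r ih =>
    intro prev g c
    simp only [List.zip_cons_cons, List.foldl_cons, grpT]
    by_cases hgap : y - prev > th
    · simp only [if_pos hgap]
      rw [ih y (g ++ [c]) [y]]
      simp [consH]
    · simp only [if_neg hgap]
      rw [ih y g (c ++ [y])]
      simp [consH]

-- A's index loop over range(1, len(s)) is the loop over consecutive pairs
theorem foldA (th : Int) (s : List Int) (init : List (List Int) × List Int) :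
    (PySem.List.pyRange 1 (s.length : Int) 1).foldl
      (fun (st : List (List Int) × List Int) i =>
        if PySem.List.pyGetD s i 0 - PySem.List.pyGetD s (i - 1) 0 > th then
          (st.1 ++ [st.2], [PySem.List.pyGetD s i 0])
        else
          (st.1, st.2 ++ [PySem.List.pyGetD s i 0])) init
    = (s.zip s.tail).foldl
        (fun (st : List (List Int) × List Int) (p : Int × Int) =>
          if p.2 - p.1 > th then (st.1 ++ [st.2], [p.2]) else (st.1, st.2 ++ [p.2])) init := by
  rw [rangeCast, List.foldl_map, ← zipPairs s, List.foldl_map]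
  congr 1
  funext st k
  have h1 : (((k + 1 : Nat) : Int) - 1) = ((k : Nat) : Int) := by push_cast; ring
  rw [h1, PySem.List.pyGetD_natCast, PySem.List.pyGetD_natCast]

-- PORT A computes consH h (grpT th h t) on the sorted list h :: t
theorem A_eq (v : List Int) (th h : Int) (t : List Int)
    (hs : PySem.List.sorted v (fun x => x) false = h :: t) :
    split_robot_vertex_ids v th = consH h (grpT th h t) := by
  simp only [split_robot_vertex_ids, hs]
  rw [foldA th (h :: t)]
  rw [PySem.List.pyGetD_zero_cons]
  have hzip := goZip th t h [] [h]
  simp only [List.tail_cons, List.nil_append] at hzip ⊢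
  rw [hzip]
  simp [consH]

-- the bounds of h :: s' are the shifted bounds of s', with 0 kept and a break added iff
-- the first gap is large
theorem natBounds_cons (th h y : Int) (r : List Int) :
    natBounds th (h :: y :: r)
      = if y - h > th then 0 :: (natBounds th (y :: r)).map (· + 1)
        else 0 :: ((natBounds th (y :: r)).map (· + 1)).tail := by
  have hshift : List.filter
        (fun k => decide ((h :: y :: r).getD (k + 1) 0 - (h :: y :: r).getD k 0 > th))
        (List.map Nat.succ (List.range r.length))
      = List.map Nat.succ (List.filter
          (fun k => decide ((y :: r).getD (k + 1) 0 - (y :: r).getD k 0 > th))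
          (List.range r.length)) := by
    rw [List.filter_map]
    congr 1
  unfold natBounds
  simp only [List.length_cons, Nat.add_sub_cancel]
  rw [List.range_succ_eq_map, List.filter_cons]
  simp only [hshift]
  by_cases hgap : y - h > th
  · rw [if_pos (by simp only [List.getD_cons_succ, List.getD_cons_zero, decide_eq_true_eq]; exact hgap)]
    simp [hgap, List.map_map, Function.comp_def, Nat.succ_eq_add_one]
  · rw [if_neg (by simp only [List.getD_cons_succ, List.getD_cons_zero, decide_eq_true_eq]; exact hgap)]
    simp [hgap, List.map_map, Function.comp_def, Nat.succ_eq_add_one]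

-- slicing h :: s' at shifted bounds is slicing s' at the original bounds
theorem zipShift (h : Int) (s' : List Int) (bs : List Nat) :
    ((bs.map (· + 1)).zip (bs.map (· + 1)).tail).map (sliceAt (h :: s'))
      = (bs.zip bs.tail).map (sliceAt s') := by
  rw [show (bs.map (· + 1)).tail = bs.tail.map (· + 1) from List.map_tail.symm,
      List.zip_map, List.map_map]
  apply List.map_congr_left
  intro ab _
  simp [sliceAt, Nat.add_sub_add_right, List.drop_succ_cons]

-- one cons step for B's slices
theorem natSlices_cons (th h : Int) (s' : List Int) (hne : s' ≠ []) :
    natSlices th (h :: s')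
      = if s'.getD 0 0 - h > th then [h] :: natSlices th s'
        else consH h (natSlices th s') := by
  obtain ⟨y, r, rfl⟩ := List.exists_cons_of_ne_nil hne
  obtain ⟨c, u, hcu⟩ : ∃ c u,
      ((List.range ((y :: r).length - 1)).filter
        (fun k => decide ((y :: r).getD (k + 1) 0 - (y :: r).getD k 0 > th))).map (· + 1)
        ++ [(y :: r).length] = c :: u :=
    List.exists_cons_of_ne_nil (by simp)
  have hB : natBounds th (y :: r) = 0 :: c :: u := by
    unfold natBounds
    rw [List.cons_append, hcu]
  have hkey := zipShift h (y :: r) (0 :: c :: u)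
  simp only [List.map_cons, List.tail_cons, List.zip_cons_cons] at hkey
  simp only [List.getD_cons_zero]
  by_cases hgap : y - h > th
  · rw [if_pos hgap]
    unfold natSlices
    rw [natBounds_cons, if_pos hgap, hB]
    simp only [List.map_cons, List.tail_cons, List.zip_cons_cons, List.map_cons]
    congr 1
  · rw [if_neg hgap]
    unfold natSlices
    rw [natBounds_cons, if_neg hgap, hB]
    simp only [List.map_cons, List.tail_cons, List.zip_cons_cons, List.map_cons,
      consH, List.headD_cons]
    have htl := congrArg List.tail hkey
    simp only [List.tail_cons] at htl
    congr 1

-- B's slices compute grpT too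
theorem natSlices_grpT (th : Int) (t : List Int) : ∀ (h : Int),
    natSlices th (h :: t) = consH h (grpT th h t) := by
  induction t with
  | nil =>
    intro h
    simp [natSlices, natBounds, sliceAt, grpT, consH]
  | cons y r ih =>
    intro h
    rw [natSlices_cons th h (y :: r) (by simp)]
    simp only [List.getD_cons_zero, grpT]
    by_cases hgap : y - h > th
    · simp only [if_pos hgap, ih y, consH]
      simp
    · simp only [if_neg hgap, ih y, consH]

-- PORT B computes natSlices on the sorted list h :: t
theorem B_eq_nat (v : List Int) (th h : Int) (t : List Int)
    (hs : PySem.List.sorted v (fun x => x) false = h :: t) :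
    split_robot_vertex_ids_alt v th = natSlices th (h :: t) := by
  simp only [split_robot_vertex_ids_alt, hs]
  rw [if_neg (by simp : ¬(h :: t = []))]
  rw [rangeCast (h :: t), List.filter_map]
  have hpred : ((fun i => decide
        (PySem.List.pyGetD (h :: t) i 0 - PySem.List.pyGetD (h :: t) (i - 1) 0 > th))
          ∘ (fun k : Nat => ((k + 1 : Nat) : Int)))
      = (fun k : Nat => decide ((h :: t).getD (k + 1) 0 - (h :: t).getD k 0 > th)) := by
    funext k
    simp only [Function.comp]
    have h1 : (((k + 1 : Nat) : Int) - 1) = ((k : Nat) : Int) := by push_cast; ring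
    rw [h1, PySem.List.pyGetD_natCast, PySem.List.pyGetD_natCast]
  rw [hpred]
  have hbounds : (0 : Int) :: (((List.range ((h :: t).length - 1)).filter
        (fun k : Nat => decide ((h :: t).getD (k + 1) 0 - (h :: t).getD k 0 > th))).map
          (fun k : Nat => ((k + 1 : Nat) : Int)))
        ++ [((h :: t).length : Int)]
      = (natBounds th (h :: t)).map (fun a : Nat => (a : Int)) := by
    unfold natBounds
    simp [List.map_map, Function.comp_def]
  rw [hbounds]
  rw [show ((natBounds th (h :: t)).map (fun a : Nat => (a : Int))).tail
        = (natBounds th (h :: t)).tail.map (fun a : Nat => (a : Int)) from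
      List.map_tail.symm,
    List.zip_map, List.map_map]
  apply List.map_congr_left
  intro ab _
  simp only [Function.comp, Prod.map]
  rw [PySem.List.slice_natCast]
  rfl

-- ===== VERDICT (by name: the statement is the Claim_ definition above) =====
theorem split_robot_vertex_ids_spec : Claim_equal_split_robot_vertex_ids := by
  intro v th _ hpre
  unfold Spec_split_robot_vertex_ids
  have hne : PySem.List.sorted v (fun x => x) false ≠ [] := by
    rw [Ne, PySem.List.sorted_eq_nil_iff]; exact hpre
  obtain ⟨h, t, hs⟩ : ∃ h t, PySem.List.sorted v (fun x => x) false = h :: t := by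
    cases hcase : PySem.List.sorted v (fun x => x) false with
    | nil => exact absurd hcase hne
    | cons a b => exact ⟨a, b, rfl⟩
  rw [A_eq v th h t hs, B_eq_nat v th h t hs, natSlices_grpT]
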